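-- pv_equiv track=rewrite | github.com/miliar/Code_Jam_Webscraper | solutions_python/solutions_year17_round0_nr3/1253.py | solve
-- ===== SOURCE A (Python) =====
-- def add_count(counts, num_rooms, num_count):
--     if num_rooms in counts:
--         counts[num_rooms] += num_count
--     else:
--         counts[num_rooms] = num_count
--
-- def split_rooms(num_rooms):
--     assert num_rooms > 0
--     num_rooms -= 1
--     if num_rooms % 2 == 1:
--         left = (num_rooms - 1) // 2
--         right = (num_rooms + 1) // 2
--     else:
--         left = num_rooms // 2
--         right = num_rooms // 2
--     return left, right
--
-- def solve(N, K):
--     counts = {N: 1}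
--
--     batch = 1
--     remain = K
--     while batch < remain:
--         new_counts = {}
--         for num in counts:
--             left, right = split_rooms(num)
--             if left > 0:
--                 add_count(new_counts, left, counts[num])
--             if right > 0:
--                 add_count(new_counts, right, counts[num])
--         counts = new_counts
--         remain -= batch
--         batch *= 2
--
--     finals = list(counts.keys())
--     if len(finals) == 1:
--         left, right = split_rooms(finals[0])
--     elif len(finals) == 2:
--         more = max(finals)
--         less = min(finals)
--         if remain <= counts[more]:
--             left, right = split_rooms(more)
--         else:
--             left, right = split_rooms(less)
--     else:
--         assert False
--
--     return max(left, right), min(left, right)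
-- ===== SOURCE B (Python) =====
-- def solve(N, K):
--     # Closed form: after the K-th person sits, the gap chosen has size g below;
--     # the answer is the ceil/floor halves of g - 1.
--     if K <= 1:
--         g = N
--     else:
--         p = 1 << (K.bit_length() - 1)      # p = 2^floor(log2 K)
--         f, r = divmod(N + 1, p)            # level sizes are f (r gaps) and f-1 (p-r gaps)
--         g = f if 0 < r and K - p + 1 <= r else f - 1
--     s = g - 1
--     return s - s // 2, s // 2
-- ===== Notes on version B (the rewrite author's own statement) =====
-- stated objective: simpler
-- what changed: A simulates the splitting level by level, keeping a dict of gap-size counts and rebuilding it each round; B computes the K-th person's gap in closed form (p = 2^floor(log2 K) via bit_length, then divmod(N+1, p) gives the two gap sizes at that level and their counts) and returns the ceil/floor halves of that gap.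
-- outside the precondition, e.g. on solve(2, 3): A returns (0, 0), B returns (0, -1); on solve(3, 4): A raises AssertionError, B returns (0, -1)
import Mathlib
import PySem

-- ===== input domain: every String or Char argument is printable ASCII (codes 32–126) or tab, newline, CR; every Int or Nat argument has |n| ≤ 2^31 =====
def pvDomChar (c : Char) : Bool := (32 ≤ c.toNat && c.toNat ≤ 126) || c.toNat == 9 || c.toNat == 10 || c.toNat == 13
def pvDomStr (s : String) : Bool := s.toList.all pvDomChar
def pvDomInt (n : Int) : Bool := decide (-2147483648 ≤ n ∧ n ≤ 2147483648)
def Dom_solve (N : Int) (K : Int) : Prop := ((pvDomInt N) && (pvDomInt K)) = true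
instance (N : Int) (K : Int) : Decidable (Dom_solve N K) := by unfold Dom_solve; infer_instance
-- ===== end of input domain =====

-- B replaces A's dict-of-gap-counts level simulation by a closed form: p = 2^floor(log2 K)
-- and divmod(N+1, p) give the gap the K-th person splits (objective: simpler).

-- ===== PORT A =====
-- split_rooms (its assert 'num_rooms > 0' always holds on inputs admitted by Pre_solve;
-- on N ≤ 0 the Python raises AssertionError, which Pre_solve excludes)
def pvSplitRooms (numRooms : Int) : Int × Int :=
  let n := numRooms - 1
  if PySem.Int.mod n 2 = 1 then
    (PySem.Int.floordiv (n - 1) 2, PySem.Int.floordiv (n + 1) 2)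
  else
    (PySem.Int.floordiv n 2, PySem.Int.floordiv n 2)

def pvAddCount (counts : PySem.Dict Int Int) (numRooms : Int) (numCount : Int) : PySem.Dict Int Int :=
  if counts.contains numRooms then
    counts.modify numRooms 0 (· + numCount)    -- counts[numRooms] += numCount (key present)
  else
    counts.insert numRooms numCount

-- the body of A's while loop: build new_counts from counts
def pvStep (counts : PySem.Dict Int Int) : PySem.Dict Int Int :=
  counts.keys.foldl (fun nc num =>
    let lr := pvSplitRooms num
    let c := counts.getD num 0                 -- counts[num]: num is a key of counts
    let nc := if lr.1 > 0 then pvAddCount nc lr.1 c else nc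
    if lr.2 > 0 then pvAddCount nc lr.2 c else nc) PySem.Dict.empty

-- A's while loop; the fuel only makes the recursion total (enough fuel is always supplied, see solveLoop_spec)
def pvSolveLoop : Nat → PySem.Dict Int Int → Int → Int → PySem.Dict Int Int × Int
  | 0, counts, _, remain => (counts, remain)
  | fuel + 1, counts, batch, remain =>
    if batch < remain then
      pvSolveLoop fuel (pvStep counts) (batch * 2) (remain - batch)
    else (counts, remain)

def solve (N : Int) (K : Int) : Int × Int :=
  let counts : PySem.Dict Int Int := (PySem.Dict.empty).insert N 1
  let st := pvSolveLoop ((K - 1).toNat + 1) counts 1 K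
  let remain := st.2
  match (PySem.Dict.keys st.1) with
  | [a] =>
      let lr := pvSplitRooms a
      (max lr.1 lr.2, min lr.1 lr.2)
  | [a, b] =>
      let more := max a b                       -- max(finals) / min(finals) on a 2-element list
      let less := min a b
      let lr := if remain ≤ st.1.getD more 0 then pvSplitRooms more else pvSplitRooms less
      (max lr.1 lr.2, min lr.1 lr.2)
  | _ => (0, 0)    -- Python: assert False (raises); Pre_solve excludes every input reaching this arm

-- ===== PORT B =====
def solve_alt (N : Int) (K : Int) : Int × Int :=
  let g : Int :=
    if K ≤ 1 then N
    else
      let p : Int := (1 : Int) <<< (PySem.Int.bitLength K - 1)   -- 1 << (K.bit_length() - 1)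
      let f := PySem.Int.floordiv (N + 1) p                      -- f, r = divmod(N + 1, p)
      let r := PySem.Int.mod (N + 1) p
      if 0 < r ∧ K - p + 1 ≤ r then f else f - 1
  let s := g - 1
  (s - PySem.Int.floordiv s 2, PySem.Int.floordiv s 2)

-- ===== PRECONDITION & SPEC =====
-- Pre_solve excludes N ≤ 0 (A raises AssertionError) and K > N (more people than stalls, an
-- infeasible instance of the problem: A then raises AssertionError or, for some K, returns a
-- value read off its already-exhausted gap table).
def Pre_solve (N : Int) (K : Int) : Prop := 1 ≤ N ∧ K ≤ N
instance (N : Int) (K : Int) : Decidable (Pre_solve N K) := by unfold Pre_solve; infer_instance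
def pvWitness_solve : Int × Int := (5, 3)

def Spec_solve (N : Int) (K : Int) (out : Int × Int) : Prop := out = solve_alt N K
instance (N : Int) (K : Int) (out : Int × Int) : Decidable (Spec_solve N K out) := by unfold Spec_solve; infer_instance

-- ===== CLAIM (what is proved, stated in full; the proofs are below) =====
def Claim_equal_solve : Prop := ∀ (N : Int) (K : Int), Dom_solve N K → Pre_solve N K → Spec_solve N K (solve N K)

-- ===== LEMMAS AND PROOFS =====

-- values of split_rooms
lemma pvSplit_odd (m : Int) : pvSplitRooms (2 * m + 1) = (m, m) := by
  simp only [pvSplitRooms]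
  rw [PySem.Int.mod_eq_emod_of_pos (by norm_num), PySem.Int.floordiv_eq_ediv_of_pos (by norm_num)]
  have h : (2 * m + 1 - 1) % 2 = 0 := by omega
  rw [if_neg (by omega)]
  refine Prod.ext ?_ ?_ <;> simp <;> omega

lemma pvSplit_even (m : Int) : pvSplitRooms (2 * m) = (m - 1, m) := by
  simp only [pvSplitRooms]
  rw [PySem.Int.mod_eq_emod_of_pos (by norm_num),
      PySem.Int.floordiv_eq_ediv_of_pos (by norm_num),
      PySem.Int.floordiv_eq_ediv_of_pos (by norm_num)]
  rw [if_pos (by omega)]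
  refine Prod.ext ?_ ?_ <;> simp <;> omega

-- pvAddCount on literal dicts
lemma pvAdd_empty (x n : Int) : pvAddCount PySem.Dict.empty x n = PySem.Dict.mk [(x,n)] := by
  apply PySem.Dict.ext
  simp [pvAddCount, PySem.Dict.empty, PySem.Dict.contains_mk, PySem.Dict.insert]

lemma pvAdd_one_self (a c n : Int) : pvAddCount (PySem.Dict.mk [(a,c)]) a n = PySem.Dict.mk [(a, c+n)] := by
  apply PySem.Dict.ext
  simp [pvAddCount, PySem.Dict.contains_mk, PySem.Dict.modify, PySem.Dict.items_insert,
        PySem.Dict.getD_eq_get?_getD, PySem.Dict.get?_mk_cons]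

lemma pvAdd_one_new (a c x n : Int) (h : a ≠ x) :
    pvAddCount (PySem.Dict.mk [(a,c)]) x n = PySem.Dict.mk [(a,c),(x,n)] := by
  apply PySem.Dict.ext
  simp [pvAddCount, PySem.Dict.contains_mk, PySem.Dict.items_insert, Ne.symm h, h]

lemma pvAdd_two_fst (a b ca cb n : Int) (h : a ≠ b) :
    pvAddCount (PySem.Dict.mk [(a,ca),(b,cb)]) a n = PySem.Dict.mk [(a,ca+n),(b,cb)] := by
  apply PySem.Dict.ext
  simp [pvAddCount, PySem.Dict.contains_mk, PySem.Dict.modify, PySem.Dict.items_insert,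
        PySem.Dict.getD_eq_get?_getD, PySem.Dict.get?_mk_cons, Ne.symm h, h]

lemma pvAdd_two_snd (a b ca cb n : Int) (h : a ≠ b) :
    pvAddCount (PySem.Dict.mk [(a,ca),(b,cb)]) b n = PySem.Dict.mk [(a,ca),(b,cb+n)] := by
  apply PySem.Dict.ext
  simp [pvAddCount, PySem.Dict.contains_mk, PySem.Dict.modify, PySem.Dict.items_insert,
        PySem.Dict.getD_eq_get?_getD, PySem.Dict.get?_mk_cons, Ne.symm h, h]

-- getD on literal dicts
lemma pvGetD_one_self (a c : Int) : (PySem.Dict.mk [(a,c)]).getD a 0 = c := by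
  simp [PySem.Dict.getD_eq_get?_getD, PySem.Dict.get?_mk_cons]

lemma pvGetD_two_fst (a b ca cb : Int) : (PySem.Dict.mk [(a,ca),(b,cb)]).getD a 0 = ca := by
  simp [PySem.Dict.getD_eq_get?_getD, PySem.Dict.get?_mk_cons]

lemma pvGetD_two_snd (a b ca cb : Int) (h : a ≠ b) : (PySem.Dict.mk [(a,ca),(b,cb)]).getD b 0 = cb := by
  simp [PySem.Dict.getD_eq_get?_getD, PySem.Dict.get?_mk_cons, h]

-- evaluating A's loop body on the (at most two-key) dicts that actually occur
lemma pvStep_one (a c : Int) :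
    pvStep (PySem.Dict.mk [(a,c)]) =
      (let lr := pvSplitRooms a
       let nc := if lr.1 > 0 then pvAddCount PySem.Dict.empty lr.1 c else PySem.Dict.empty
       if lr.2 > 0 then pvAddCount nc lr.2 c else nc) := by
  simp [pvStep, PySem.Dict.keys_mk, pvGetD_one_self]

lemma pvStep_two (a b ca cb : Int) (hab : a ≠ b) :
    pvStep (PySem.Dict.mk [(a,ca),(b,cb)]) =
      (let lra := pvSplitRooms a
       let nc := if lra.1 > 0 then pvAddCount PySem.Dict.empty lra.1 ca else PySem.Dict.empty
       let nc := if lra.2 > 0 then pvAddCount nc lra.2 ca else nc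
       let lrb := pvSplitRooms b
       let nc2 := if lrb.1 > 0 then pvAddCount nc lrb.1 cb else nc
       if lrb.2 > 0 then pvAddCount nc2 lrb.2 cb else nc2) := by
  simp [pvStep, PySem.Dict.keys_mk, pvGetD_two_fst, pvGetD_two_snd a b ca cb hab]

-- the gap distribution A's dict holds after i rounds of splitting, in terms of T = N + 1:
-- the gaps at level i are f-1 = T/2^i - 1 (2^i - r of them) and f = ceil(T/2^i) - 1 (r = T mod 2^i of them),
-- with zero-size gaps dropped
def LoopInv (T : Int) (i : Nat) (d : PySem.Dict Int Int) : Prop :=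
  ∃ f r : Int, T = 2 ^ i * f + r ∧ 0 ≤ r ∧ r < 2 ^ i ∧
    ((r = 0 ∧ 2 ≤ f ∧ d = PySem.Dict.mk [(f - 1, 2 ^ i)])
     ∨ (0 < r ∧ 2 ≤ f ∧ (d = PySem.Dict.mk [(f, r), (f - 1, 2 ^ i - r)]
                          ∨ d = PySem.Dict.mk [(f - 1, 2 ^ i - r), (f, r)]))
     ∨ (0 < r ∧ f = 1 ∧ d = PySem.Dict.mk [(1, r)]))

lemma step_inv (T : Int) (i : Nat) (d : PySem.Dict Int Int)
    (hinv : LoopInv T i d) (hT : 2 * 2 ^ i < T) : LoopInv T (i + 1) (pvStep d) := by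
  obtain ⟨f, r, hTe, hr0, hrp, hcase⟩ := hinv
  have hpp : (0 : Int) < 2 ^ i := by positivity
  have hps : (2 : Int) ^ (i + 1) = 2 * 2 ^ i := by ring
  rcases hcase with ⟨hr, hf, hd⟩ | ⟨hr, hf, hd | hd⟩ | ⟨hr, hf, hd⟩
  · -- one key f-1 with count 2^i  (r = 0)
    subst hd; subst hr
    have hf3 : 2 < f := by nlinarith
    rcases Int.even_or_odd f with ⟨m, hm⟩ | ⟨m, hm⟩
    · -- f = 2m, m ≥ 2
      have hm2 : 2 ≤ m := by omega
      rw [pvStep_one, show f - 1 = 2 * (m - 1) + 1 by omega]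
      simp only [pvSplit_odd]
      split_ifs <;> try (exfalso; omega)
      rw [pvAdd_empty, pvAdd_one_self]
      refine ⟨m, 0, by rw [hps]; linear_combination hTe + 2 ^ i * hm, le_refl 0, by positivity,
        Or.inl ⟨rfl, by omega, ?_⟩⟩
      rw [show (2:Int) ^ i + 2 ^ i = 2 ^ (i+1) by rw [hps]; ring]
    · -- f = 2m + 1, m ≥ 1
      rw [pvStep_one, show f - 1 = 2 * m by omega]
      simp only [pvSplit_even]
      rcases (show m = 1 ∨ 2 ≤ m by omega) with hm1 | hm2
      · subst hm1
        split_ifs <;> try (exfalso; omega)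
        rw [pvAdd_empty]
        exact ⟨1, 2 ^ i, by rw [hps]; linear_combination hTe + 2 ^ i * hm, by positivity,
          by rw [hps]; omega, Or.inr (Or.inr ⟨hpp, rfl, rfl⟩)⟩
      · split_ifs <;> try (exfalso; omega)
        rw [pvAdd_empty, pvAdd_one_new _ _ _ _ (by omega)]
        refine ⟨m, 2 ^ i, by rw [hps]; linear_combination hTe + 2 ^ i * hm, le_of_lt hpp,
          by rw [hps]; omega, Or.inr (Or.inl ⟨hpp, by omega, Or.inr ?_⟩)⟩
        rw [show (2:Int) ^ (i+1) - 2 ^ i = 2 ^ i by rw [hps]; ring]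
  · -- two keys, order [(f, r), (f-1, 2^i - r)]
    subst hd
    rcases Int.even_or_odd f with ⟨m, hm⟩ | ⟨m, hm⟩
    · -- f = 2m, m ≥ 1
      rw [pvStep_two _ _ _ _ (by omega), show f = 2 * m by omega,
          show (2 * m : Int) - 1 = 2 * (m - 1) + 1 by ring]
      simp only [pvSplit_even, pvSplit_odd]
      rcases (show m = 1 ∨ 2 ≤ m by omega) with hm1 | hm2
      · subst hm1
        split_ifs <;> try (exfalso; omega)
        rw [pvAdd_empty]
        exact ⟨1, r, by rw [hps]; linear_combination hTe + 2 ^ i * hm, hr0, by rw [hps]; omega,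
          Or.inr (Or.inr ⟨hr, rfl, rfl⟩)⟩
      · split_ifs <;> try (exfalso; omega)
        rw [pvAdd_empty, pvAdd_one_new _ _ _ _ (by omega),
            pvAdd_two_fst _ _ _ _ _ (by omega), pvAdd_two_fst _ _ _ _ _ (by omega)]
        refine ⟨m, r, by rw [hps]; linear_combination hTe + 2 ^ i * hm, hr0, by rw [hps]; omega,
          Or.inr (Or.inl ⟨hr, by omega, Or.inr ?_⟩)⟩
        rw [show r + (2 ^ i - r) + (2 ^ i - r) = (2:Int) ^ (i+1) - r by rw [hps]; ring]
    · -- f = 2m + 1, m ≥ 1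
      have hm1' : 1 ≤ m := by omega
      rw [pvStep_two _ _ _ _ (by omega), show f = 2 * m + 1 by omega,
          show (2 * m + 1 : Int) - 1 = 2 * m by ring]
      simp only [pvSplit_odd, pvSplit_even]
      rcases (show m = 1 ∨ 2 ≤ m by omega) with hm1 | hm2
      · subst hm1
        split_ifs <;> try (exfalso; omega)
        rw [pvAdd_empty, pvAdd_one_self, pvAdd_one_self]
        exact ⟨1, 2 ^ i + r, by rw [hps]; linear_combination hTe + 2 ^ i * hm, by omega,
          by rw [hps]; omega,
          Or.inr (Or.inr ⟨by omega, rfl, by rw [show r + r + (2 ^ i - r) = (2:Int) ^ i + r by ring]⟩)⟩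
      · split_ifs <;> try (exfalso; omega)
        rw [pvAdd_empty, pvAdd_one_self, pvAdd_one_new _ _ _ _ (by omega),
            pvAdd_two_fst _ _ _ _ _ (by omega)]
        refine ⟨m, 2 ^ i + r, by rw [hps]; linear_combination hTe + 2 ^ i * hm, by omega,
          by rw [hps]; omega, Or.inr (Or.inl ⟨by omega, by omega, Or.inl ?_⟩)⟩
        rw [show r + r + (2 ^ i - r) = (2:Int) ^ i + r by ring,
            show (2:Int) ^ (i+1) - (2 ^ i + r) = 2 ^ i - r by rw [hps]; ring]
  · -- two keys, order [(f-1, 2^i - r), (f, r)]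
    subst hd
    rcases Int.even_or_odd f with ⟨m, hm⟩ | ⟨m, hm⟩
    · -- f = 2m, m ≥ 1
      rw [pvStep_two _ _ _ _ (by omega), show f = 2 * m by omega,
          show (2 * m : Int) - 1 = 2 * (m - 1) + 1 by ring]
      simp only [pvSplit_even, pvSplit_odd]
      rcases (show m = 1 ∨ 2 ≤ m by omega) with hm1 | hm2
      · subst hm1
        split_ifs <;> try (exfalso; omega)
        rw [pvAdd_empty]
        exact ⟨1, r, by rw [hps]; linear_combination hTe + 2 ^ i * hm, hr0, by rw [hps]; omega,
          Or.inr (Or.inr ⟨hr, rfl, rfl⟩)⟩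
      · split_ifs <;> try (exfalso; omega)
        rw [pvAdd_empty, pvAdd_one_self, pvAdd_one_self, pvAdd_one_new _ _ _ _ (by omega)]
        refine ⟨m, r, by rw [hps]; linear_combination hTe + 2 ^ i * hm, hr0, by rw [hps]; omega,
          Or.inr (Or.inl ⟨hr, by omega, Or.inr ?_⟩)⟩
        rw [show 2 ^ i - r + (2 ^ i - r) + r = (2:Int) ^ (i+1) - r by rw [hps]; ring]
    · -- f = 2m + 1, m ≥ 1
      have hm1' : 1 ≤ m := by omega
      rw [pvStep_two _ _ _ _ (by omega), show f - 1 = 2 * m by omega,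
          show f = 2 * m + 1 by omega]
      simp only [pvSplit_even, pvSplit_odd]
      rcases (show m = 1 ∨ 2 ≤ m by omega) with hm1 | hm2
      · subst hm1
        split_ifs <;> try (exfalso; omega)
        rw [pvAdd_empty, pvAdd_one_self, pvAdd_one_self]
        exact ⟨1, 2 ^ i + r, by rw [hps]; linear_combination hTe + 2 ^ i * hm, by omega,
          by rw [hps]; omega,
          Or.inr (Or.inr ⟨by omega, rfl, by rw [show 2 ^ i - r + r + r = (2:Int) ^ i + r by ring]⟩)⟩
      · split_ifs <;> try (exfalso; omega)
        rw [pvAdd_empty, pvAdd_one_new _ _ _ _ (by omega),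
            pvAdd_two_snd _ _ _ _ _ (by omega), pvAdd_two_snd _ _ _ _ _ (by omega)]
        refine ⟨m, 2 ^ i + r, by rw [hps]; linear_combination hTe + 2 ^ i * hm, by omega,
          by rw [hps]; omega, Or.inr (Or.inl ⟨by omega, by omega, Or.inr ?_⟩)⟩
        rw [show 2 ^ i - r + r + r = (2:Int) ^ i + r by ring,
            show (2:Int) ^ (i+1) - (2 ^ i + r) = 2 ^ i - r by rw [hps]; ring]
  · -- f = 1: impossible while the loop still runs (T < 2 * 2^i)
    exfalso; subst hf; omega

lemma solveLoop_spec (T K : Int) (i : Nat) (fuel : Nat) (d : PySem.Dict Int Int)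
    (hinv : LoopInv T i d) (hK : 2 ^ i ≤ K) (hKT : K < T)
    (hfuel : (K - 2 ^ i).toNat < fuel) :
    ∃ (l : Nat) (dd : PySem.Dict Int Int),
      pvSolveLoop fuel d (2 ^ i) (K - 2 ^ i + 1) = (dd, K - 2 ^ l + 1) ∧
      LoopInv T l dd ∧ 2 ^ l ≤ K ∧ K < 2 ^ (l + 1) := by
  induction fuel generalizing i d with
  | zero => omega
  | succ fuel ih =>
    have hps : (2 : Int) ^ (i + 1) = 2 * 2 ^ i := by ring
    have hp1 : (1 : Int) ≤ 2 ^ i := by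
      have : (0:Int) < 2 ^ i := by positivity
      omega
    by_cases hc : (2 : Int) ^ i < K - 2 ^ i + 1
    · have hT2 : 2 * 2 ^ i < T := by omega
      have e1 : (2 : Int) ^ i * 2 = 2 ^ (i + 1) := by ring
      have e2 : K - 2 ^ i + 1 - 2 ^ i = K - 2 ^ (i + 1) + 1 := by rw [hps]; ring
      simp only [pvSolveLoop]
      rw [if_pos hc, e1, e2]
      have hp1' : (1 : Int) ≤ 2 ^ (i + 1) := by
        have : (0:Int) < 2 ^ (i+1) := by positivity
        omega
      exact ih (i + 1) (pvStep d) (step_inv T i d hinv hT2) (by omega) (by omega)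
    · simp only [pvSolveLoop]
      rw [if_neg hc]
      exact ⟨i, d, rfl, hinv, hK, by omega⟩

-- A's final answer and B's final pair computation agree on the picked gap g
lemma final_eq (g : Int) (hg : 1 ≤ g) :
    (max (pvSplitRooms g).1 (pvSplitRooms g).2, min (pvSplitRooms g).1 (pvSplitRooms g).2) =
      (g - 1 - PySem.Int.floordiv (g - 1) 2, PySem.Int.floordiv (g - 1) 2) := by
  rcases Int.even_or_odd g with ⟨m, hm⟩ | ⟨m, hm⟩
  · subst hm
    rw [show m + m = 2 * m by ring, pvSplit_even,
        PySem.Int.floordiv_eq_ediv_of_pos (by norm_num)]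
    refine Prod.ext ?_ ?_ <;> simp [max_def, min_def] <;> first | (split_ifs <;> omega) | omega
  · subst hm
    rw [pvSplit_odd, PySem.Int.floordiv_eq_ediv_of_pos (by norm_num)]
    refine Prod.ext ?_ ?_ <;> simp [max_def, min_def] <;> first | (split_ifs <;> omega) | omega

-- the power of two B computes is the level the loop stops at
lemma pow_log_eq (K : Int) (l : Nat) (h2 : 2 ≤ K) (hl : 2 ^ l ≤ K) (hr : K < 2 ^ (l + 1)) :
    (1 : Int) <<< (PySem.Int.bitLength K - 1) = 2 ^ l := by
  have h1 := PySem.Int.lt_two_pow_bitLength K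
  have h2' := PySem.Int.two_pow_bitLength_le K (by omega)
  have hcl : ((2 ^ l : Nat) : Int) = 2 ^ l := by push_cast; ring
  have hcl1 : ((2 ^ (l + 1) : Nat) : Int) = 2 ^ (l + 1) := by push_cast; ring
  have hNl : 2 ^ l ≤ K.natAbs := by omega
  have hNr : K.natAbs < 2 ^ (l + 1) := by omega
  have hbl : PySem.Int.bitLength K - 1 = l := by
    by_contra hne
    rcases Nat.lt_or_ge (PySem.Int.bitLength K - 1) l with hlt | hge
    · have : 2 ^ PySem.Int.bitLength K ≤ 2 ^ l :=
        Nat.pow_le_pow_right (by norm_num) (by omega)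
      omega
    · have : 2 ^ (l + 1) ≤ 2 ^ (PySem.Int.bitLength K - 1) :=
        Nat.pow_le_pow_right (by norm_num) (by omega)
      omega
  rw [hbl, Int.shiftLeft_eq]; ring

-- ===== VERDICT (by name: the statement is the Claim_ definition above) =====
theorem solve_spec : Claim_equal_solve := by
  unfold Claim_equal_solve
  intro N K _ hpre
  obtain ⟨hN, hKN⟩ := hpre
  unfold Spec_solve solve solve_alt
  dsimp only
  have hinit : (PySem.Dict.empty : PySem.Dict Int Int).insert N 1 = PySem.Dict.mk [(N, 1)] := by
    apply PySem.Dict.ext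
    simp [PySem.Dict.insert, PySem.Dict.empty]
  by_cases hK1 : K ≤ 1
  · have hstop : pvSolveLoop ((K - 1).toNat + 1) (PySem.Dict.mk [(N, 1)]) 1 K
        = (PySem.Dict.mk [(N, 1)], K) := by
      simp only [pvSolveLoop]
      rw [if_neg (by omega)]
    rw [hinit, hstop]
    simp only [PySem.Dict.keys_mk, List.map_cons, List.map_nil]
    rw [if_pos hK1]
    exact final_eq N (by omega)
  · push_neg at hK1
    have h20 : ((2:Int) ^ (0:Nat)) = 1 := pow_zero 2
    have hinv0 : LoopInv (N + 1) 0 (PySem.Dict.mk [(N, 1)]) := by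
      refine ⟨N + 1, 0, by ring, le_refl 0, by norm_num, Or.inl ⟨rfl, by omega, by norm_num⟩⟩
    obtain ⟨l, dd, hloop, hinvl, hlK, hKl⟩ :=
      solveLoop_spec (N + 1) K 0 ((K - 1).toNat + 1) (PySem.Dict.mk [(N, 1)]) hinv0
        (by rw [h20]; omega) (by omega) (by rw [h20]; omega)
    have hloop' : pvSolveLoop ((K - 1).toNat + 1) (PySem.Dict.mk [(N, 1)]) 1 K
        = (dd, K - 2 ^ l + 1) := by
      rw [h20] at hloop
      rw [show K - 1 + 1 = K by ring] at hloop
      exact hloop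
    rw [hinit, hloop']
    have hp : (1 : Int) <<< (PySem.Int.bitLength K - 1) = 2 ^ l :=
      pow_log_eq K l (by omega) hlK hKl
    rw [if_neg (by omega : ¬ K ≤ 1), hp]
    have hppos : (0 : Int) < 2 ^ l := by positivity
    obtain ⟨f, r, hTe, hr0, hrp, hcase⟩ := hinvl
    have hfd : PySem.Int.floordiv (N + 1) (2 ^ l) = f := by
      rw [PySem.Int.floordiv_eq_iff_of_pos hppos]
      constructor <;> nlinarith
    have hmd : PySem.Int.mod (N + 1) (2 ^ l) = r := by
      have h := PySem.Int.floordiv_mul_add_mod (N + 1) (2 ^ l)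
      rw [hfd] at h
      linear_combination hTe + h
    rw [hfd, hmd]
    rcases hcase with ⟨hr, hf, hd⟩ | ⟨hr, hf, hd | hd⟩ | ⟨hr, hf, hd⟩
    · -- single key f - 1 (r = 0)
      subst hd
      simp only [PySem.Dict.keys_mk, List.map_cons, List.map_nil]
      rw [if_neg (by omega)]
      exact final_eq (f - 1) (by omega)
    · -- keys [f, f-1]
      subst hd
      simp only [PySem.Dict.keys_mk, List.map_cons, List.map_nil]
      rw [max_eq_left (by omega : f - 1 ≤ f), min_eq_right (by omega : f - 1 ≤ f),
          pvGetD_two_fst]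
      by_cases hcnd : K - 2 ^ l + 1 ≤ r
      · rw [if_pos hcnd, if_pos ⟨hr, hcnd⟩]
        exact final_eq f (by omega)
      · rw [if_neg hcnd, if_neg (by tauto)]
        exact final_eq (f - 1) (by omega)
    · -- keys [f-1, f]
      subst hd
      simp only [PySem.Dict.keys_mk, List.map_cons, List.map_nil]
      rw [max_eq_right (by omega : f - 1 ≤ f), min_eq_left (by omega : f - 1 ≤ f),
          pvGetD_two_snd _ _ _ _ (by omega)]
      by_cases hcnd : K - 2 ^ l + 1 ≤ r
      · rw [if_pos hcnd, if_pos ⟨hr, hcnd⟩]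
        exact final_eq f (by omega)
      · rw [if_neg hcnd, if_neg (by tauto)]
        exact final_eq (f - 1) (by omega)
    · -- single key 1 (f = 1)
      subst hf; subst hd
      simp only [PySem.Dict.keys_mk, List.map_cons, List.map_nil]
      rw [if_pos ⟨hr, by omega⟩]
      exact final_eq 1 (by norm_num)
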